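-- pv_equiv track=rewrite | github.com/cmbi/hommod-api | hommod_rest/services/modelutils.py | identifyDeletedRegions
-- ===== SOURCE A (Python) =====
-- def identifyDeletedRegions (alignedseq):
--
--     # Place x-es wherever there's a deletion:
--
--     #'ASFGASHDF....GSARRAEYT...'
--     #              ||
--     #              \/
--     #'         xxxx         xxx'
--
--     deletions = ''
--     for i in range (len (alignedseq)):
--         if alignedseq[i].isalpha():
--             deletions += ' '
--         else:
--             deletions += 'x'
--
--             if i > 0 and deletions[i-1] != 'x':
--                 j = max(0, i-3)
--                 if 'x' in deletions[j:i]: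
--                     deletions = deletions[:j+1] + 'x' * (i-j)
--
--     # convert 'x'-es to ranges,  ignore the terminal 'x'-es.
--
--     #'     xxxxxx     xx     xxxx'
--     #              ||
--     #              \/
--     #      5 --- 11  16-18
--
--     ranges = []
--     i = 0
--     while i < len(deletions):
--         i = deletions.find('x', i)
--         if i == -1:
--             break
--
--         f = deletions.find(' ', i)
--         if f == -1:
--             break
--
--         if i > 0:
--             ranges.append([i, f])
--         i = f+1
--
--     return ranges
-- ===== SOURCE B (Python) =====
-- def identifyDeletedRegions(alignedseq):
--     # Run-length algebra: split the sequence into maximal (is_deletion, length)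
--     # runs, turn every letter run of length <= 2 that sits between two deletion
--     # runs into a deletion run (merging neighbours), then emit [start, end) for
--     # every deletion run that neither starts the string nor ends it.
--     runs = []                       # alternating [is_deletion, length] runs
--     for c in alignedseq:
--         d = not c.isalpha()
--         if runs and runs[-1][0] == d:
--             runs[-1][1] += 1
--         else:
--             runs.append([d, 1])
--
--     merged = []                     # runs after closing short letter gaps
--     for k in range(len(runs)):
--         d, n = runs[k]
--         if not d and n <= 2 and merged and merged[-1][0] and k + 1 < len(runs):
--             d = True                # gap between deletions: becomes deletion
--         if merged and merged[-1][0] == d: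
--             merged[-1][1] += n
--         else:
--             merged.append([d, n])
--
--     ranges = []
--     pos = 0
--     for k in range(len(merged)):
--         d, n = merged[k]
--         if d and pos > 0 and k + 1 < len(merged):
--             ranges.append([pos, pos + n])
--         pos += n
--     return ranges
-- ===== Notes on version B (the rewrite author's own statement) =====
-- stated objective: alternative
-- what changed: Replaces A's per-character deletion mask (string concatenation with slice-rebuild backfill and find()-based scanning) by run-length algebra: decompose the sequence into maximal (is-deletion, length) runs, merge letter runs of length <= 2 lying between deletion runs into their neighbours, and read the ranges off the merged run list with a prefix position.
import Mathlib
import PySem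

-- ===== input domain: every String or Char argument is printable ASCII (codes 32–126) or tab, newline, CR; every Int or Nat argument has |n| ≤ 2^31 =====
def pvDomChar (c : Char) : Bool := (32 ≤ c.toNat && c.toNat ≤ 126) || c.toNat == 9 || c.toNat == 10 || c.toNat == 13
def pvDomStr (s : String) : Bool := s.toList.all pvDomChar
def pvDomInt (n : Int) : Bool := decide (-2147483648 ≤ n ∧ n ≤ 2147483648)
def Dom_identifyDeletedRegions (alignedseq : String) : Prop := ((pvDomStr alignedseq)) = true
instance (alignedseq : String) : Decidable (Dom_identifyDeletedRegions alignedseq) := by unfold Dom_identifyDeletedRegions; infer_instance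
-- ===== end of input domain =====

-- B replaces A's per-character deletion mask (string concatenation with slice-rebuild
-- backfill, then find()-based scanning) by run-length algebra: the string is split into
-- maximal (is-deletion, length) runs, short letter runs between deletion runs are merged
-- into their neighbours, and the ranges are read off the run list with a prefix position.

-- ===== PORT A =====
-- loop body of A's first loop (building `deletions`); in the backfill `'x' * (i - j)` we have i - j ≥ 0
def pvAStep (s : List Char) (deletions : List Char) (i : Int) : List Char :=
  if PySem.Chars.isalpha (PySem.List.pyGetD s i ' ') then
    deletions ++ [' ']
  else
    let d := deletions ++ ['x']
    if i > 0 ∧ PySem.List.pyGetD d (i - 1) ' ' ≠ 'x' then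
      let j := max 0 (i - 3)
      if PySem.Chars.isIn ['x'] (PySem.List.slice d (some j) (some i)) then
        PySem.List.slice d none (some (j + 1)) ++ List.replicate (i - j).toNat 'x'
      else d
    else d

-- A's `while i < len(deletions)` loop; fuel `length + 1` suffices because i strictly increases
def pvARanges (deletions : List Char) : Nat → Int → List (List Int) → List (List Int)
  | 0, _, ranges => ranges
  | fuel + 1, i, ranges =>
    if i < (deletions.length : Int) then
      let i' := PySem.Chars.findFrom deletions ['x'] i
      if i' = -1 then ranges
      else
        let f := PySem.Chars.findFrom deletions [' '] i'
        if f = -1 then ranges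
        else
          pvARanges deletions fuel (f + 1) (if i' > 0 then ranges ++ [[i', f]] else ranges)
    else ranges

def identifyDeletedRegions (alignedseq : String) : List (List Int) :=
  let s := alignedseq.toList
  let deletions := (PySem.List.pyRange 0 (s.length : Int)).foldl (pvAStep s) []
  pvARanges deletions (deletions.length + 1) 0 []

-- ===== PORT B =====
-- `merged and merged[-1][0]` of Source B (deletion flag of the last run, False if none)
def pvHeadDel : List (Bool × Nat) → Bool
  | (b, _) :: _ => b
  | [] => false

-- Source B pass 1: run-length decomposition; the run list is kept reversed (Python appends
-- to / increments the LAST run) and reversed once at the end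
def pvRuns : List Char → List (Bool × Nat) → List (Bool × Nat)
  | [], acc => acc.reverse
  | c :: rest, acc =>
    let d := !(PySem.Chars.isalpha c)
    match acc with
    | (d', n) :: t => if d' == d then pvRuns rest ((d', n + 1) :: t) else pvRuns rest ((d, 1) :: (d', n) :: t)
    | [] => pvRuns rest [(d, 1)]

-- Source B pass 2: close short letter gaps between deletion runs, merging equal neighbours
-- (`k + 1 < len(runs)` is `rest ≠ []`); `merged` kept reversed as in pass 1
def pvMerge : List (Bool × Nat) → List (Bool × Nat) → List (Bool × Nat)
  | [], acc => acc.reverse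
  | (d, n) :: rest, acc =>
    let d' := if !d && decide (n ≤ 2) && pvHeadDel acc && !rest.isEmpty then true else d
    match acc with
    | (d'', n') :: t => if d'' == d' then pvMerge rest ((d'', n' + n) :: t) else pvMerge rest ((d', n) :: (d'', n') :: t)
    | [] => pvMerge rest [(d', n)]

-- Source B pass 3: emit [pos, pos+n) for interior deletion runs
def pvEmit : List (Bool × Nat) → Nat → List (List Int) → List (List Int)
  | [], _, ranges => ranges
  | (d, n) :: rest, pos, ranges =>
    pvEmit rest (pos + n)
      (if d && decide (0 < pos) && !rest.isEmpty then ranges ++ [[(pos : Int), ((pos + n : Nat) : Int)]] else ranges)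

def identifyDeletedRegions_alt (alignedseq : String) : List (List Int) :=
  pvEmit (pvMerge (pvRuns alignedseq.toList []) []) 0 []

-- ===== PRECONDITION & SPEC =====
def Spec_identifyDeletedRegions (alignedseq : String) (out : List (List Int)) : Prop := out = identifyDeletedRegions_alt alignedseq
instance (alignedseq : String) (out : List (List Int)) : Decidable (Spec_identifyDeletedRegions alignedseq out) := by unfold Spec_identifyDeletedRegions; infer_instance

-- ===== CLAIM (what is proved, stated in full; the proofs are below) =====
def Claim_equal_identifyDeletedRegions : Prop := ∀ (alignedseq : String), Dom_identifyDeletedRegions alignedseq → Spec_identifyDeletedRegions alignedseq (identifyDeletedRegions alignedseq)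

-- ===== LEMMAS AND PROOFS =====

-- ---- proof-side model of A's mask build: a mark list with a capped gap counter ----
def pvToChar (b : Bool) : Char := if b then 'x' else ' '
def pvRender (m : List Bool) : List Char := (m.map pvToChar).reverse

-- the deletion mask A builds, as a reversed Bool list with gap counter (proof intermediary)
def pvBMark : List Char → List Bool → Nat → List Bool
  | [], marksRev, _ => marksRev
  | c :: rest, marksRev, gap =>
    if PySem.Chars.isalpha c then
      pvBMark rest (false :: marksRev) (min (gap + 1) 3)
    else
      pvBMark rest
        (true :: (if gap = 1 ∨ gap = 2 then List.replicate gap true ++ marksRev.drop gap else marksRev))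
        0

-- a linear range scan over the mark list (proof intermediary)
def pvBScan : List Bool → Nat → Option Nat → List (List Int) → List (List Int)
  | [], _, _, ranges => ranges
  | m :: rest, i, start, ranges =>
    if m then
      pvBScan rest (i + 1) (some (start.getD i)) ranges
    else
      match start with
      | some st => pvBScan rest (i + 1) none (if 0 < st then ranges ++ [[(st : Int), (i : Int)]] else ranges)
      | none => pvBScan rest (i + 1) none ranges

-- the gap counter, read off the reversed mark list
def pvGapFun : List Bool → Nat
  | true :: _ => 0
  | false :: true :: _ => 1
  | false :: false :: true :: _ => 2
  | _ => 3

theorem pvRender_cons (b : Bool) (m : List Bool) : pvRender (b :: m) = pvRender m ++ [pvToChar b] := by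
  simp [pvRender]

theorem pvRender_length (m : List Bool) : (pvRender m).length = m.length := by
  simp [pvRender]

theorem pvGetD_append (r t : List Char) (x c : Char) :
    PySem.List.pyGetD (r ++ x :: t) (r.length : Int) c = x := by
  rw [PySem.List.pyGetD_of_nonneg _ _ (by positivity)]
  simp [List.getD]

theorem pvSlice_window (r l : List Char) (n : Nat) :
    PySem.List.slice (r ++ l) (some (r.length : Int)) (some ((r.length + n : Nat) : Int)) = l.take n := by
  rw [PySem.List.slice_natCast, List.drop_left, Nat.add_sub_cancel_left]

theorem pvSlice_take (l : List Char) (k : Nat) :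
    PySem.List.slice l none (some (k : Int)) = l.take k := by
  rw [PySem.List.slice_to _ (by positivity)]; simp

theorem pvAStep_eq (s : List Char) (c : Char) (mRev : List Bool)
    (hc : PySem.List.pyGetD s (mRev.length : Int) ' ' = c) :
    pvAStep s (pvRender mRev) (mRev.length : Int)
      = pvRender (if PySem.Chars.isalpha c then false :: mRev
          else true :: (if pvGapFun mRev = 1 ∨ pvGapFun mRev = 2 then
              List.replicate (pvGapFun mRev) true ++ mRev.drop (pvGapFun mRev) else mRev)) := by
  by_cases h : PySem.Chars.isalpha c
  · simp [pvAStep, hc, h, pvRender_cons, pvToChar]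
  · rw [if_neg h]
    rcases mRev with _ | ⟨_ | _, m1⟩
    · -- mRev = []
      simp only [pvAStep]; rw [hc, if_neg h]; decide
    · -- mRev = false :: m1
      rcases m1 with _ | ⟨_ | _, m2⟩
      · -- mRev = [false] : gap 3
        simp only [pvAStep]; rw [hc, if_neg h]; decide
      · -- mRev = false :: false :: m2
        rcases m2 with _ | ⟨_ | _, m⟩
        · -- mRev = [false, false] : gap 3
          simp only [pvAStep]; rw [hc, if_neg h]; decide
        · -- mRev = false :: false :: false :: m : gap 3
          simp only [pvAStep]; rw [hc, if_neg h]
          have hlen : ((false :: false :: false :: m).length : Nat) = m.length + 3 := by simp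
          rw [hlen]
          have hd : pvRender (false :: false :: false :: m) ++ ['x']
              = (pvRender m ++ [' ', ' ']) ++ ' ' :: ['x'] := by
            simp [pvRender_cons, pvToChar]
          rw [if_pos ?hc3]
          case hc3 =>
            refine ⟨by positivity, ?_⟩
            rw [hd, show ((m.length + 3 : Nat) : Int) - 1 = (((pvRender m ++ [' ', ' ']).length : Nat) : Int) from by
              simp [pvRender_length]; ring]
            rw [pvGetD_append]
            decide
          rw [show max 0 ((((m.length + 3 : Nat) : Int)) - 3) = ((pvRender m).length : Int) from by
            rw [pvRender_length]; push_cast; omega]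
          rw [hd, show (pvRender m ++ [' ', ' ']) ++ ' ' :: ['x'] = pvRender m ++ [' ', ' ', ' ', 'x'] from by simp]
          rw [show ((m.length + 3 : Nat) : Int) = (((pvRender m).length + 3 : Nat) : Int) from by rw [pvRender_length]]
          rw [pvSlice_window]
          rw [if_neg (by rw [PySem.Chars.isIn_iff_infix, List.singleton_infix_iff]; decide)]
          simp [pvGapFun, pvRender_cons, pvToChar]
        · -- mRev = false :: false :: true :: m : gap 2
          simp only [pvAStep]; rw [hc, if_neg h]
          have hlen : ((false :: false :: true :: m).length : Nat) = m.length + 3 := by simp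
          rw [hlen]
          have hd : pvRender (false :: false :: true :: m) ++ ['x']
              = (pvRender m ++ ['x', ' ']) ++ ' ' :: ['x'] := by
            simp [pvRender_cons, pvToChar]
          rw [if_pos ?hc2]
          case hc2 =>
            refine ⟨by positivity, ?_⟩
            rw [hd, show ((m.length + 3 : Nat) : Int) - 1 = (((pvRender m ++ ['x', ' ']).length : Nat) : Int) from by
              simp [pvRender_length]; ring]
            rw [pvGetD_append]
            decide
          rw [show max 0 ((((m.length + 3 : Nat) : Int)) - 3) = ((pvRender m).length : Int) from by
            rw [pvRender_length]; push_cast; omega]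
          rw [hd, show (pvRender m ++ ['x', ' ']) ++ ' ' :: ['x'] = pvRender m ++ ['x', ' ', ' ', 'x'] from by simp]
          rw [show ((m.length + 3 : Nat) : Int) = (((pvRender m).length + 3 : Nat) : Int) from by rw [pvRender_length]]
          rw [pvSlice_window]
          rw [if_pos (by rw [PySem.Chars.isIn_iff_infix, List.singleton_infix_iff]; decide)]
          rw [show ((pvRender m).length : Int) + 1 = (((pvRender m).length + 1 : Nat) : Int) from by push_cast; ring]
          rw [pvSlice_take, List.take_length_add_append]
          rw [show ((((pvRender m).length + 3 : Nat) : Int) - ((pvRender m).length : Int)).toNat = 3 from by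
            push_cast; omega]
          simp [pvGapFun, pvRender_cons, pvToChar]
      · -- mRev = false :: true :: m2 : gap 1
        rcases m2 with _ | ⟨b2, m⟩
        · -- mRev = [false, true]
          simp only [pvAStep]; rw [hc, if_neg h]; decide
        · -- mRev = false :: true :: b2 :: m
          simp only [pvAStep]; rw [hc, if_neg h]
          have hlen : ((false :: true :: b2 :: m).length : Nat) = m.length + 3 := by simp
          rw [hlen]
          have hd : pvRender (false :: true :: b2 :: m) ++ ['x']
              = (pvRender m ++ [pvToChar b2, 'x']) ++ ' ' :: ['x'] := by
            simp [pvRender_cons, pvToChar]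
          rw [if_pos ?hc1]
          case hc1 =>
            refine ⟨by positivity, ?_⟩
            rw [hd, show ((m.length + 3 : Nat) : Int) - 1 = (((pvRender m ++ [pvToChar b2, 'x']).length : Nat) : Int) from by
              simp [pvRender_length]; ring]
            rw [pvGetD_append]
            decide
          rw [show max 0 ((((m.length + 3 : Nat) : Int)) - 3) = ((pvRender m).length : Int) from by
            rw [pvRender_length]; push_cast; omega]
          rw [hd, show (pvRender m ++ [pvToChar b2, 'x']) ++ ' ' :: ['x'] = pvRender m ++ [pvToChar b2, 'x', ' ', 'x'] from by simp]
          rw [show ((m.length + 3 : Nat) : Int) = (((pvRender m).length + 3 : Nat) : Int) from by rw [pvRender_length]]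
          rw [pvSlice_window]
          rw [if_pos (by rw [PySem.Chars.isIn_iff_infix, List.singleton_infix_iff]; simp)]
          rw [show ((pvRender m).length : Int) + 1 = (((pvRender m).length + 1 : Nat) : Int) from by push_cast; ring]
          rw [pvSlice_take, List.take_length_add_append]
          rw [show ((((pvRender m).length + 3 : Nat) : Int) - ((pvRender m).length : Int)).toNat = 3 from by
            push_cast; omega]
          simp [pvGapFun, pvRender_cons, pvToChar]
    · -- mRev = true :: m1 : gap 0, previous char is 'x'
      simp only [pvAStep]; rw [hc, if_neg h]
      rw [if_neg ?hc0]
      case hc0 =>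
        intro ⟨_, hne⟩
        apply hne
        have hshape : pvRender (true :: m1) ++ ['x'] = pvRender m1 ++ 'x' :: ['x'] := by
          simp [pvRender_cons, pvToChar]
        rw [hshape, show (((true :: m1).length : Nat) : Int) - 1 = ((pvRender m1).length : Int) from by
          simp [pvRender_length]]
        exact pvGetD_append _ _ _ _
      simp [pvGapFun, pvRender_cons, pvToChar]

theorem pvGapFun_false (m : List Bool) : pvGapFun (false :: m) = min (pvGapFun m + 1) 3 := by
  rcases m with _ | ⟨_|_, _ | ⟨_|_, _ | ⟨_|_, m⟩⟩⟩ <;> rfl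

theorem pvFill_length (mRev : List Bool) (h : pvGapFun mRev = 1 ∨ pvGapFun mRev = 2) :
    (List.replicate (pvGapFun mRev) true ++ mRev.drop (pvGapFun mRev)).length = mRev.length := by
  rcases mRev with _ | ⟨_|_, _ | ⟨_|_, _ | ⟨_|_, m⟩⟩⟩ <;> simp_all [pvGapFun]

theorem pvBuild_loop : ∀ (rest pre : List Char) (mRev : List Bool),
    mRev.length = pre.length →
    (PySem.List.pyRange (pre.length : Int) ((pre.length + rest.length : Nat) : Int)).foldl
        (pvAStep (pre ++ rest)) (pvRender mRev)
      = pvRender (pvBMark rest mRev (pvGapFun mRev)) := by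
  intro rest
  induction rest with
  | nil =>
    intro pre mRev hlen
    rw [show ((pre.length + [].length : Nat) : Int) = (pre.length : Int) from by simp]
    rw [show PySem.List.pyRange (pre.length : Int) (pre.length : Int) = [] from by simp [PySem.List.pyRange]]
    rfl
  | cons c rest ih =>
    intro pre mRev hlen
    have hlt : (pre.length : Int) < ((pre.length + (c :: rest).length : Nat) : Int) := by
      simp only [List.length_cons]; push_cast; omega
    rw [PySem.List.pyRange_one_cons hlt, List.foldl_cons]
    have hc : PySem.List.pyGetD (pre ++ c :: rest) (mRev.length : Int) ' ' = c := by
      rw [hlen]; exact pvGetD_append pre rest c ' '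
    rw [← hlen, pvAStep_eq (pre ++ c :: rest) c mRev hc]
    by_cases h : PySem.Chars.isalpha c
    · rw [if_pos h]
      rw [show ((mRev.length : Int) + 1) = (((pre ++ [c]).length : Nat) : Int) from by simp [hlen],
          show ((mRev.length + (c :: rest).length : Nat) : Int) = (((pre ++ [c]).length + rest.length : Nat) : Int) from by simp [hlen]; try omega,
          show pre ++ c :: rest = (pre ++ [c]) ++ rest from by simp]
      rw [ih (pre ++ [c]) (false :: mRev) (by simp [hlen])]
      rw [pvGapFun_false]
      rw [pvBMark, if_pos h]
    · rw [if_neg h]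
      set mRev₂ := true :: (if pvGapFun mRev = 1 ∨ pvGapFun mRev = 2 then
          List.replicate (pvGapFun mRev) true ++ mRev.drop (pvGapFun mRev) else mRev) with hm2
      have hlen₂ : mRev₂.length = (pre ++ [c]).length := by
        rw [hm2]
        by_cases hg : pvGapFun mRev = 1 ∨ pvGapFun mRev = 2
        · simp only [List.length_cons, if_pos hg, pvFill_length mRev hg]
          simp [hlen]
        · simp [if_neg hg, hlen]
      rw [show ((mRev.length : Int) + 1) = (((pre ++ [c]).length : Nat) : Int) from by simp [hlen],
          show ((mRev.length + (c :: rest).length : Nat) : Int) = (((pre ++ [c]).length + rest.length : Nat) : Int) from by simp [hlen]; try omega,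
          show pre ++ c :: rest = (pre ++ [c]) ++ rest from by simp]
      rw [ih (pre ++ [c]) mRev₂ hlen₂]
      rw [show pvGapFun mRev₂ = 0 from by rw [hm2]; rfl]
      rw [pvBMark, if_neg h]

theorem pvRender_chars (m : List Bool) : ∀ c ∈ pvRender m, c = ' ' ∨ c = 'x' := by
  intro c hc
  simp only [pvRender, List.mem_reverse, List.mem_map] at hc
  obtain ⟨b, -, rfl⟩ := hc
  cases b <;> simp [pvToChar]

theorem pvRender_map (m : List Bool) : (pvRender m).map (· == 'x') = m.reverse := by
  simp only [pvRender, ← List.map_reverse, List.map_map, Function.comp_def]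
  have : (fun x => pvToChar x == 'x') = id := by funext b; cases b <;> rfl
  rw [this, List.map_id]

theorem pvBScan_allFalse (m : List Bool) : ∀ (i : Nat) (acc : List (List Int)),
    (∀ b ∈ m, b = false) → pvBScan m i none acc = acc := by
  induction m with
  | nil => intro i acc _; rfl
  | cons b rest ih =>
    intro i acc h
    have hb := h b (by simp)
    subst hb
    simpa [pvBScan] using ih (i+1) acc (fun x hx => h x (by simp [hx]))

theorem pvBScan_falseBlock (p : Nat) : ∀ (m : List Bool) (i : Nat) (acc : List (List Int)),
    pvBScan (List.replicate p false ++ m) i none acc = pvBScan m (i + p) none acc := by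
  induction p with
  | zero => intro m i acc; simp
  | succ p ih =>
    intro m i acc
    rw [List.replicate_succ, List.cons_append]
    simpa [pvBScan, Nat.add_assoc, Nat.add_comm 1 p] using ih m (i+1) acc

theorem pvBScan_trueBlock (p : Nat) : ∀ (m : List Bool) (i st : Nat) (acc : List (List Int)),
    pvBScan (List.replicate p true ++ m) i (some st) acc = pvBScan m (i + p) (some st) acc := by
  induction p with
  | zero => intro m i st acc; simp
  | succ p ih =>
    intro m i st acc
    rw [List.replicate_succ, List.cons_append]
    simpa [pvBScan, Nat.add_assoc, Nat.add_comm 1 p] using ih m (i+1) st acc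

theorem pvBScan_trueStart (p : Nat) (m : List Bool) (i : Nat) (acc : List (List Int)) (hp : 0 < p) :
    pvBScan (List.replicate p true ++ m) i none acc = pvBScan m (i + p) (some i) acc := by
  obtain ⟨q, rfl⟩ : ∃ q, p = q + 1 := ⟨p - 1, by omega⟩
  rw [List.replicate_succ, List.cons_append]
  simpa [pvBScan, Nat.add_assoc, Nat.add_comm 1 q] using pvBScan_trueBlock q m (i+1) i acc

theorem pvDrop_block (c : Char) : ∀ (n a : Nat) (d : List Char), a + n ≤ d.length →
    (∀ q (h : a + q < d.length), q < n → d[a + q] = c) →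
    d.drop a = List.replicate n c ++ d.drop (a + n) := by
  intro n
  induction n with
  | zero => intro a d _ _; simp
  | succ n ih =>
    intro a d hlen h
    have ha : a < d.length := by omega
    rw [List.drop_eq_getElem_cons ha]
    have h0 : d[a] = c := by have := h 0 (by omega) (by omega); simpa using this
    rw [h0, List.replicate_succ, List.cons_append]
    have := ih (a+1) d (by omega) (fun q hq hqn => by
      have := h (q+1) (by omega) (by omega)
      simpa [Nat.add_assoc, Nat.add_comm 1 q] using this)
    rw [this, show a + 1 + n = a + (n + 1) from by omega]

theorem pvPrefix_singleton (d : List Char) (j : Nat) (c : Char) :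
    [c] <+: d.drop j ↔ d[j]? = some c := by
  rw [← List.head?_drop]
  cases h : d.drop j with
  | nil => simp
  | cons a l => simp [List.cons_prefix_cons, eq_comm]

theorem pvScan_loop : ∀ (fuel : Nat) (d : List Char) (k : Nat) (acc : List (List Int)),
    (∀ c ∈ d, c = ' ' ∨ c = 'x') → k ≤ d.length → d.length - k < fuel →
    pvARanges d fuel (k : Int) acc = pvBScan ((d.drop k).map (· == 'x')) k none acc := by
  intro fuel
  induction fuel with
  | zero => intro d k acc _ hk hf; omega
  | succ fuel ih =>
    intro d k acc hok hk hf
    by_cases hkl : k < d.length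
    · rw [pvARanges]
      rw [if_pos (by exact_mod_cast hkl)]
      rw [PySem.Chars.findFrom_natCast d ['x'] k hk]
      by_cases hx : PySem.Chars.find (d.drop k) ['x'] = -1
      · rw [if_pos (by simp [hx])]
        refine (pvBScan_allFalse _ k acc ?_).symm
        intro b hb
        simp only [List.mem_map] at hb
        obtain ⟨c, hc, rfl⟩ := hb
        have hxmem : 'x' ∉ d.drop k := by
          rw [← List.singleton_infix_iff]
          exact (PySem.Chars.find_eq_neg_one_iff _ _).mp hx
        rcases hok c (List.mem_of_mem_drop hc) with rfl | rfl
        · rfl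
        · exact absurd hc hxmem
      · rw [if_neg hx]
        have hge : 0 ≤ PySem.Chars.find (d.drop k) ['x'] := by
          have := PySem.Chars.neg_one_le_find (d.drop k) ['x']
          omega
        obtain ⟨spec1, spec2⟩ := PySem.Chars.find_spec (s := d.drop k) (sub := ['x']) hge
        set pI := PySem.Chars.find (d.drop k) ['x'] with hpI
        set p := pI.toNat with hp
        have hpcast : pI = (p : Int) := (Int.toNat_of_nonneg hge).symm
        rw [List.drop_drop] at spec1
        have hxat : d[k + p]? = some 'x' := (pvPrefix_singleton d (k + p) 'x').mp spec1
        obtain ⟨hkp_lt, hxel⟩ := List.getElem?_eq_some_iff.mp hxat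
        have hspace : ∀ q, q < p → ∀ (h : k + q < d.length), d[k + q] = ' ' := by
          intro q hq h
          have hnp := spec2 q hq
          rw [List.drop_drop, pvPrefix_singleton] at hnp
          rcases hok d[k+q] (List.getElem_mem h) with h' | h'
          · exact h'
          · exact absurd (List.getElem?_eq_some_iff.mpr ⟨h, h'⟩) hnp
        rw [if_neg (by omega)]
        have hcast2 : (k : Int) + pI = ((k + p : Nat) : Int) := by rw [hpcast]; push_cast; ring
        rw [hcast2]
        rw [PySem.Chars.findFrom_natCast d [' '] (k + p) (by omega)]
        have hblock1 : d.drop k = List.replicate p ' ' ++ d.drop (k + p) :=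
          pvDrop_block ' ' p k d (by omega) (fun q h hq => hspace q hq h)
        by_cases hs : PySem.Chars.find (d.drop (k + p)) [' '] = -1
        · rw [if_pos (by simp [hs])]
          have hxall : ∀ c ∈ d.drop (k + p), c = 'x' := by
            intro c hc
            have hsm : ' ' ∉ d.drop (k + p) := by
              rw [← List.singleton_infix_iff]
              exact (PySem.Chars.find_eq_neg_one_iff _ _).mp hs
            rcases hok c (List.mem_of_mem_drop hc) with rfl | rfl
            · exact absurd hc hsm
            · rfl
          have hrep : d.drop (k + p) = List.replicate (d.length - (k + p)) 'x' := by
            have h1 := List.eq_replicate_of_mem hxall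
            rw [List.length_drop] at h1
            exact h1
          rw [hblock1, hrep]
          rw [List.map_append, List.map_replicate, List.map_replicate]
          rw [show (' ' == 'x') = false from rfl, show ('x' == 'x') = true from rfl]
          rw [pvBScan_falseBlock]
          rw [← List.append_nil (List.replicate (d.length - (k + p)) true)]
          rw [pvBScan_trueStart _ _ _ _ (by omega)]
          rfl
        · rw [if_neg hs]
          have hge2 : 0 ≤ PySem.Chars.find (d.drop (k + p)) [' '] := by
            have := PySem.Chars.neg_one_le_find (d.drop (k + p)) [' ']
            omega
          obtain ⟨sspec1, sspec2⟩ := PySem.Chars.find_spec (s := d.drop (k + p)) (sub := [' ']) hge2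
          set qI := PySem.Chars.find (d.drop (k + p)) [' '] with hqI
          set q := qI.toNat with hq
          have hqcast : qI = (q : Int) := (Int.toNat_of_nonneg hge2).symm
          rw [List.drop_drop] at sspec1
          have hsat : d[k + p + q]? = some ' ' := (pvPrefix_singleton d (k + p + q) ' ').mp sspec1
          obtain ⟨hf_lt, hsel⟩ := List.getElem?_eq_some_iff.mp hsat
          have hq1 : 1 ≤ q := by
            rcases Nat.eq_zero_or_pos q with h0 | h1
            · exfalso
              rw [h0, Nat.add_zero] at hsat
              rw [hxat] at hsat
              simp at hsat
            · exact h1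
          have hxrun : ∀ r, r < q → ∀ (h : k + p + r < d.length), d[k + p + r] = 'x' := by
            intro r hr h
            have hnp := sspec2 r hr
            rw [List.drop_drop, pvPrefix_singleton] at hnp
            rcases hok d[k+p+r] (List.getElem_mem h) with h' | h'
            · exact absurd (List.getElem?_eq_some_iff.mpr ⟨h, h'⟩) hnp
            · exact h'
          have hcast3 : ((k + p : Nat) : Int) + qI = ((k + p + q : Nat) : Int) := by rw [hqcast]; push_cast; ring
          rw [hcast3]
          have hblock2 : d.drop (k + p) = List.replicate q 'x' ++ d.drop (k + p + q) :=
            pvDrop_block 'x' q (k + p) d (by omega) (fun r h hr => hxrun r hr h)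
          have hcons : d.drop (k + p + q) = ' ' :: d.drop (k + p + q + 1) := by
            rw [List.drop_eq_getElem_cons (by omega : k + p + q < d.length)]
            rw [hsel]
          rw [hblock1, hblock2, hcons]
          rw [List.map_append, List.map_append, List.map_cons, List.map_replicate, List.map_replicate]
          rw [show (' ' == 'x') = false from rfl, show ('x' == 'x') = true from rfl]
          rw [pvBScan_falseBlock]
          rw [pvBScan_trueStart _ _ _ _ (by omega)]
          rw [show pvBScan (false :: List.map (fun x => x == 'x') (d.drop (k + p + q + 1))) (k + p + q) (some (k + p)) acc
              = pvBScan (List.map (fun x => x == 'x') (d.drop (k + p + q + 1))) (k + p + q + 1) none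
                  (if 0 < k + p then acc ++ [[((k + p : Nat) : Int), ((k + p + q : Nat) : Int)]] else acc) from by
            simp [pvBScan]]
          have harr : ((k + p + q : Nat) : Int) + 1 = ((k + p + q + 1 : Nat) : Int) := by push_cast; ring
          simp only [harr]
          rw [if_neg (by omega : ¬((k + p + q : Nat) : Int) = -1)]
          rw [ih d (k + p + q + 1) _ hok (by omega) (by omega)]
          congr 1
          by_cases hpos : 0 < k + p
          · rw [if_pos (by exact_mod_cast hpos), if_pos hpos]
          · rw [if_neg (by exact_mod_cast hpos), if_neg hpos]
    · have hke : k = d.length := by omega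
      rw [pvARanges, if_neg (by exact_mod_cast Nat.not_lt.mpr (le_of_eq hke.symm))]
      rw [hke, List.drop_length]
      rfl

-- ---- the bridge from the mark list to B's run-length representation ----

def pvDel (c : Char) : Bool := !(PySem.Chars.isalpha c)

-- bool-sequence versions of the mark build and the run build
def pvBMarkB : List Bool → List Bool → Nat → List Bool
  | [], marksRev, _ => marksRev
  | b :: rest, marksRev, gap =>
    if b then
      pvBMarkB rest
        (true :: (if gap = 1 ∨ gap = 2 then List.replicate gap true ++ marksRev.drop gap else marksRev))
        0
    else
      pvBMarkB rest (false :: marksRev) (min (gap + 1) 3)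

def pvRleAux : List Bool → List (Bool × Nat) → List (Bool × Nat)
  | [], acc => acc.reverse
  | b :: rest, acc =>
    match acc with
    | (d', n) :: t => if d' == b then pvRleAux rest ((d', n + 1) :: t) else pvRleAux rest ((b, 1) :: (d', n) :: t)
    | [] => pvRleAux rest [(b, 1)]

theorem pvBMark_eq_B : ∀ (cs : List Char) (mR : List Bool) (g : Nat),
    pvBMark cs mR g = pvBMarkB (cs.map pvDel) mR g := by
  intro cs
  induction cs with
  | nil => intro mR g; rfl
  | cons c rest ih =>
    intro mR g
    by_cases h : PySem.Chars.isalpha c <;>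
      simp [pvBMark, pvBMarkB, pvDel, h, ih]

theorem pvRuns_eq : ∀ (cs : List Char) (acc : List (Bool × Nat)),
    pvRuns cs acc = pvRleAux (cs.map pvDel) acc := by
  intro cs
  induction cs with
  | nil => intro acc; rfl
  | cons c rest ih =>
    intro acc
    cases acc with
    | nil => simp [pvRuns, pvRleAux, pvDel, ih]
    | cons hd t =>
      obtain ⟨d', n⟩ := hd
      by_cases h : d' == pvDel c <;> simp [pvRuns, pvRleAux, pvDel, h, ih]

-- canonical run-length decomposition (first run explicit)
def pvRleW : List Bool → List (Bool × Nat)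
  | [] => []
  | b :: rest => (b, 1 + (rest.takeWhile (· == b)).length) :: pvRleW (rest.dropWhile (· == b))
termination_by l => l.length
decreasing_by
  simpa [Nat.lt_succ_iff] using List.length_dropWhile_le (· == b) rest

def pvFlat (rs : List (Bool × Nat)) : List Bool := rs.flatMap fun r => List.replicate r.2 r.1

def pvAlt (rs : List (Bool × Nat)) : Prop :=
  List.IsChain (fun a b => a.1 ≠ b.1) rs ∧ ∀ x ∈ rs, 1 ≤ x.2

-- the flag a run carries after the gap-closing pass
def pvFlipD (d : Bool) (n : Nat) (prev notlast : Bool) : Bool :=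
  if !d && decide (n ≤ 2) && prev && notlast then true else d

-- the gap-closing pass, fused with flattening (proof intermediary for pvMerge)
def pvFlipFlat : Bool → List (Bool × Nat) → List Bool
  | _, [] => []
  | prev, (d, n) :: rest =>
    List.replicate n (pvFlipD d n prev (!rest.isEmpty)) ++ pvFlipFlat (pvFlipD d n prev (!rest.isEmpty)) rest

theorem pvTakeWhile_rep (b : Bool) (l : List Bool) :
    l.takeWhile (· == b) = List.replicate (l.takeWhile (· == b)).length b := by
  have : ∀ x ∈ l.takeWhile (· == b), x = b := by
    intro x hx
    have := List.mem_takeWhile_imp hx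
    simpa using this
  exact List.eq_replicate_of_mem this

theorem pvDropWhile_head (p : Bool → Bool) : ∀ (l : List Bool) (b : Bool) (t : List Bool),
    l.dropWhile p = b :: t → p b = false := by
  intro l
  induction l with
  | nil => intro b t h; simp at h
  | cons x rest ih =>
    intro b t h
    by_cases hx : p x
    · rw [List.dropWhile_cons_of_pos hx] at h
      exact ih b t h
    · rw [List.dropWhile_cons_of_neg hx] at h
      cases h
      simpa using hx

theorem pvAlt_tail {r : Bool × Nat} {l : List (Bool × Nat)} (h : pvAlt (r :: l)) : pvAlt l :=
  ⟨h.1.tail, fun x hx => h.2 x (by simp [hx])⟩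

theorem pvFlat_rleW : ∀ (N : Nat) (bs : List Bool), bs.length ≤ N → pvFlat (pvRleW bs) = bs := by
  intro N
  induction N with
  | zero =>
    intro bs h
    have hnil : bs = [] := List.eq_nil_of_length_eq_zero (Nat.le_zero.mp h)
    subst hnil
    simp [pvRleW, pvFlat]
  | succ N ih =>
    intro bs h
    cases bs with
    | nil => simp [pvRleW, pvFlat]
    | cons b rest =>
      rw [pvRleW]
      have hlen : (rest.dropWhile (· == b)).length ≤ N := by
        have := List.length_dropWhile_le (· == b) rest
        simp at h; omega
      rw [show pvFlat ((b, 1 + (rest.takeWhile (· == b)).length) :: pvRleW (rest.dropWhile (· == b)))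
          = List.replicate (1 + (rest.takeWhile (· == b)).length) b ++ pvFlat (pvRleW (rest.dropWhile (· == b))) from by
        simp [pvFlat]]
      rw [ih _ hlen]
      rw [show (1 + (rest.takeWhile (· == b)).length) = (rest.takeWhile (· == b)).length + 1 from by omega]
      rw [List.replicate_succ, ← pvTakeWhile_rep, List.cons_append, List.takeWhile_append_dropWhile]

theorem pvRleAux_rep : ∀ (k : Nat) (bs : List Bool) (d : Bool) (n : Nat) (t : List (Bool × Nat)),
    pvRleAux (List.replicate k d ++ bs) ((d, n) :: t) = pvRleAux bs ((d, n + k) :: t) := by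
  intro k
  induction k with
  | zero => intro bs d n t; simp
  | succ k ih =>
    intro bs d n t
    rw [List.replicate_succ, List.cons_append]
    rw [show pvRleAux (d :: (List.replicate k d ++ bs)) ((d, n) :: t) = pvRleAux (List.replicate k d ++ bs) ((d, n + 1) :: t) from by
      simp [pvRleAux]]
    rw [ih, show n + 1 + k = n + (k + 1) from by omega]

def pvGood (acc : List (Bool × Nat)) (bs : List Bool) : Prop :=
  match bs, acc with
  | b :: _, (d, _) :: _ => d ≠ b
  | _, _ => True

theorem pvRleAux_eq_W : ∀ (N : Nat) (bs : List Bool) (acc : List (Bool × Nat)), bs.length ≤ N →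
    pvGood acc bs → pvRleAux bs acc = acc.reverse ++ pvRleW bs := by
  intro N
  induction N with
  | zero =>
    intro bs acc h _
    have hnil : bs = [] := List.eq_nil_of_length_eq_zero (Nat.le_zero.mp h)
    subst hnil
    simp [pvRleAux, pvRleW]
  | succ N ih =>
    intro bs acc h hg
    cases bs with
    | nil => simp [pvRleAux, pvRleW]
    | cons b rest =>
      have hstep : pvRleAux (b :: rest) acc = pvRleAux rest ((b, 1) :: acc) := by
        cases acc with
        | nil => rfl
        | cons hd t =>
          obtain ⟨d, n⟩ := hd
          have hne : d ≠ b := hg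
          simp [pvRleAux, hne]
      rw [hstep]
      have hdecomp : rest = List.replicate (rest.takeWhile (· == b)).length b ++ rest.dropWhile (· == b) := by
        conv_lhs => rw [← List.takeWhile_append_dropWhile (p := (· == b)) (l := rest)]
        rw [← pvTakeWhile_rep]
      rw [show pvRleAux rest ((b, 1) :: acc)
          = pvRleAux (List.replicate (rest.takeWhile (· == b)).length b ++ rest.dropWhile (· == b)) ((b, 1) :: acc) from by
        rw [← hdecomp]]
      rw [pvRleAux_rep]
      have hlen : (rest.dropWhile (· == b)).length ≤ N := by
        have := List.length_dropWhile_le (· == b) rest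
        simp at h; omega
      have hgood' : pvGood ((b, 1 + (rest.takeWhile (· == b)).length) :: acc) (rest.dropWhile (· == b)) := by
        cases hdw : rest.dropWhile (· == b) with
        | nil => trivial
        | cons b' t' =>
          have hpb := pvDropWhile_head (· == b) rest b' t' hdw
          simp only [beq_eq_false_iff_ne, ne_eq] at hpb
          exact fun hbb => hpb hbb.symm
      rw [ih _ _ hlen hgood']
      rw [pvRleW]
      simp

theorem pvRleW_alt : ∀ (N : Nat) (bs : List Bool), bs.length ≤ N → pvAlt (pvRleW bs) := by
  intro N
  induction N with
  | zero =>
    intro bs h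
    have hnil : bs = [] := List.eq_nil_of_length_eq_zero (Nat.le_zero.mp h)
    subst hnil
    exact ⟨by simp only [pvRleW]; exact List.isChain_nil, by simp [pvRleW]⟩
  | succ N ih =>
    intro bs h
    cases bs with
    | nil => exact ⟨by simp only [pvRleW]; exact List.isChain_nil, by simp [pvRleW]⟩
    | cons b rest =>
      have hlen : (rest.dropWhile (· == b)).length ≤ N := by
        have := List.length_dropWhile_le (· == b) rest
        simp at h; omega
      obtain ⟨hch, hpos⟩ := ih _ hlen
      rw [pvRleW]
      refine ⟨?_, ?_⟩
      · cases hdw : rest.dropWhile (· == b) with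
        | nil =>
          simp only [pvRleW]
          exact List.isChain_singleton _
        | cons b' t' =>
          rw [hdw] at hch
          simp only [pvRleW] at hch
          simp only [pvRleW]
          rw [List.isChain_cons_cons]
          refine ⟨?_, hch⟩
          have hpb := pvDropWhile_head (· == b) rest b' t' hdw
          simp only [beq_eq_false_iff_ne, ne_eq] at hpb
          exact fun hbb => hpb hbb.symm
      · intro x hx
        rcases List.mem_cons.mp hx with rfl | hx'
        · simp
        · exact hpos x hx'

theorem pvMerge_flat : ∀ (rs acc : List (Bool × Nat)),
    pvFlat (pvMerge rs acc) = pvFlat acc.reverse ++ pvFlipFlat (pvHeadDel acc) rs := by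
  intro rs
  induction rs with
  | nil => intro acc; simp [pvMerge, pvFlipFlat]
  | cons r rest ih =>
    obtain ⟨d, n⟩ := r
    intro acc
    cases acc with
    | nil =>
      have hunf : pvMerge ((d, n) :: rest) []
          = pvMerge rest [(pvFlipD d n (pvHeadDel ([] : List (Bool × Nat))) (!rest.isEmpty), n)] := rfl
      rw [hunf, ih]
      simp [pvFlat, pvHeadDel, pvFlipFlat]
    | cons hd t =>
      obtain ⟨d'', n'⟩ := hd
      have hunf : pvMerge ((d, n) :: rest) ((d'', n') :: t)
          = if d'' == pvFlipD d n (pvHeadDel ((d'', n') :: t)) (!rest.isEmpty) then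
              pvMerge rest ((d'', n' + n) :: t)
            else
              pvMerge rest ((pvFlipD d n (pvHeadDel ((d'', n') :: t)) (!rest.isEmpty), n) :: (d'', n') :: t) := rfl
      rw [hunf]
      by_cases he : (d'' == pvFlipD d n (pvHeadDel ((d'', n') :: t)) (!rest.isEmpty)) = true
      · rw [if_pos he, ih ((d'', n' + n) :: t)]
        have hde : d'' = pvFlipD d n (pvHeadDel ((d'', n') :: t)) (!rest.isEmpty) := by simpa using he
        rw [show pvFlipFlat (pvHeadDel ((d'', n') :: t)) ((d, n) :: rest)
            = List.replicate n (pvFlipD d n (pvHeadDel ((d'', n') :: t)) (!rest.isEmpty))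
              ++ pvFlipFlat (pvFlipD d n (pvHeadDel ((d'', n') :: t)) (!rest.isEmpty)) rest from rfl]
        rw [← hde]
        have hrep : List.replicate (n' + n) d'' = List.replicate n' d'' ++ List.replicate n d'' := by
          rw [List.replicate_add]
        simp only [List.reverse_cons, pvFlat, pvHeadDel, List.flatMap_append, List.flatMap_cons,
          List.flatMap_nil, List.nil_append, List.append_nil, hrep, List.append_assoc]
      · rw [if_neg he, ih ((pvFlipD d n (pvHeadDel ((d'', n') :: t)) (!rest.isEmpty), n) :: (d'', n') :: t)]
        rw [show pvFlipFlat (pvHeadDel ((d'', n') :: t)) ((d, n) :: rest)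
            = List.replicate n (pvFlipD d n (pvHeadDel ((d'', n') :: t)) (!rest.isEmpty))
              ++ pvFlipFlat (pvFlipD d n (pvHeadDel ((d'', n') :: t)) (!rest.isEmpty)) rest from rfl]
        simp [pvFlat, pvHeadDel]

theorem pvAlt_reverse (l : List (Bool × Nat)) (h : pvAlt l) : pvAlt l.reverse := by
  obtain ⟨hc, hp⟩ := h
  refine ⟨?_, by simpa using hp⟩
  rw [List.isChain_reverse]
  exact hc.imp (fun _ _ hab => Ne.symm hab)

theorem pvMerge_alt : ∀ (rs acc : List (Bool × Nat)),
    (∀ x ∈ rs, 1 ≤ x.2) → pvAlt acc → pvAlt (pvMerge rs acc) := by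
  intro rs
  induction rs with
  | nil =>
    intro acc _ hacc
    rw [pvMerge]
    exact pvAlt_reverse acc hacc
  | cons r rest ih =>
    obtain ⟨d, n⟩ := r
    intro acc hpos hacc
    have hn : 1 ≤ n := hpos (d, n) (by simp)
    have hpos' : ∀ x ∈ rest, 1 ≤ x.2 := fun x hx => hpos x (by simp [hx])
    cases acc with
    | nil =>
      have hunf : pvMerge ((d, n) :: rest) []
          = pvMerge rest [(pvFlipD d n (pvHeadDel ([] : List (Bool × Nat))) (!rest.isEmpty), n)] := rfl
      rw [hunf]
      exact ih _ hpos' ⟨List.isChain_singleton _, by simpa using hn⟩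
    | cons hd t =>
      obtain ⟨d'', n'⟩ := hd
      have hunf : pvMerge ((d, n) :: rest) ((d'', n') :: t)
          = if d'' == pvFlipD d n (pvHeadDel ((d'', n') :: t)) (!rest.isEmpty) then
              pvMerge rest ((d'', n' + n) :: t)
            else
              pvMerge rest ((pvFlipD d n (pvHeadDel ((d'', n') :: t)) (!rest.isEmpty), n) :: (d'', n') :: t) := rfl
      rw [hunf]
      by_cases he : (d'' == pvFlipD d n (pvHeadDel ((d'', n') :: t)) (!rest.isEmpty)) = true
      · rw [if_pos he]
        refine ih _ hpos' ⟨?_, ?_⟩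
        · cases t with
          | nil => exact List.isChain_singleton _
          | cons a t' =>
            obtain ⟨h1, h2⟩ := List.isChain_cons_cons.mp hacc.1
            exact List.isChain_cons_cons.mpr ⟨h1, h2⟩
        · intro x hx
          rcases List.mem_cons.mp hx with rfl | hx'
          · have := hacc.2 (d'', n') (by simp)
            simp at this ⊢
            omega
          · exact hacc.2 x (by simp [hx'])
      · rw [if_neg he]
        refine ih _ hpos' ⟨?_, ?_⟩
        · rw [List.isChain_cons_cons]
          refine ⟨?_, hacc.1⟩
          have hne : d'' ≠ pvFlipD d n (pvHeadDel ((d'', n') :: t)) (!rest.isEmpty) := by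
            simpa using he
          exact fun hx => hne hx.symm
        · intro x hx
          rcases List.mem_cons.mp hx with rfl | hx'
          · simpa using hn
          · exact hacc.2 x hx'

theorem pvBMarkB_falseBlock : ∀ (n : Nat) (bs mR : List Bool) (g : Nat), g ≤ 3 →
    pvBMarkB (List.replicate n false ++ bs) mR g = pvBMarkB bs (List.replicate n false ++ mR) (min (g + n) 3) := by
  intro n
  induction n with
  | zero =>
    intro bs mR g hg
    simp only [List.replicate_zero, List.nil_append, Nat.add_zero]
    rw [show min g 3 = g from by omega]
  | succ n ih =>
    intro bs mR g hg
    rw [List.replicate_succ, List.cons_append]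
    rw [show pvBMarkB (false :: (List.replicate n false ++ bs)) mR g
        = pvBMarkB (List.replicate n false ++ bs) (false :: mR) (min (g + 1) 3) from rfl]
    rw [ih bs (false :: mR) (min (g + 1) 3) (by omega)]
    have h1 : List.replicate n false ++ false :: mR = List.replicate (n + 1) false ++ mR := by
      simp [List.replicate_succ', List.append_assoc]
    have h2 : min (min (g + 1) 3 + n) 3 = min (g + (n + 1)) 3 := by omega
    rw [h1, h2]
    simp [List.replicate_succ]

theorem pvBMarkB_trueBlock : ∀ (m : Nat) (bs mR : List Bool),
    pvBMarkB (List.replicate m true ++ bs) mR 0 = pvBMarkB bs (List.replicate m true ++ mR) 0 := by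
  intro m
  induction m with
  | zero => intro bs mR; simp
  | succ m ih =>
    intro bs mR
    rw [List.replicate_succ, List.cons_append]
    rw [show pvBMarkB (true :: (List.replicate m true ++ bs)) mR 0
        = pvBMarkB (List.replicate m true ++ bs) (true :: mR) 0 from by
      simp [pvBMarkB]]
    rw [ih bs (true :: mR)]
    have h1 : List.replicate m true ++ true :: mR = List.replicate (m + 1) true ++ mR := by
      simp [List.replicate_succ', List.append_assoc]
    rw [h1]
    simp [List.replicate_succ]

theorem pvEmit_false (k : Nat) (rest : List (Bool × Nat)) (P : Nat) (X : List (List Int)) :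
    pvEmit ((false, k) :: rest) P X = pvEmit rest (P + k) X := by
  simp [pvEmit]

theorem pvBMarkB_flip : ∀ (N : Nat) (rs : List (Bool × Nat)), rs.length ≤ N → pvAlt rs →
    ∀ (p : Bool) (mR : List Bool),
    pvBMarkB (pvFlat rs) mR (if p then 0 else 3) = (pvFlipFlat p rs).reverse ++ mR := by
  intro N
  induction N with
  | zero =>
    intro rs h _ p mR
    have hnil : rs = [] := List.eq_nil_of_length_eq_zero (Nat.le_zero.mp h)
    subst hnil
    simp [pvFlat, pvFlipFlat, pvBMarkB]
  | succ N ih =>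
    intro rs h halt p mR
    rcases rs with _ | ⟨⟨d, n⟩, rest⟩
    · simp [pvFlat, pvFlipFlat, pvBMarkB]
    · have hn : 1 ≤ n := halt.2 (d, n) (by simp)
      cases d
      · -- a letter run
        cases rest with
        | nil =>
          have hflat : pvFlat [((false : Bool), n)] = List.replicate n false ++ [] := by simp [pvFlat]
          rw [hflat, pvBMarkB_falseBlock n [] mR _ (by cases p <;> simp)]
          rw [show pvFlipFlat p [((false : Bool), n)]
              = List.replicate n (pvFlipD false n p false) ++ pvFlipFlat (pvFlipD false n p false) [] from rfl]
          rw [show pvFlipD false n p false = false from by simp [pvFlipD]]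
          simp [pvFlipFlat, pvBMarkB]
        | cons r2 rest' =>
          obtain ⟨d2, m⟩ := r2
          have hne := (List.isChain_cons_cons.mp halt.1).1
          have hd2 : d2 = true := by
            cases d2
            · exact absurd rfl hne
            · rfl
          subst hd2
          have hm1 : 1 ≤ m := halt.2 (true, m) (by simp)
          obtain ⟨m', rfl⟩ : ∃ m', m = m' + 1 := ⟨m - 1, by omega⟩
          have hrest' : pvAlt rest' := pvAlt_tail (pvAlt_tail halt)
          have hfuel : rest'.length ≤ N := by simp at h; omega
          have hflat : pvFlat (((false : Bool), n) :: (true, m' + 1) :: rest')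
              = List.replicate n false ++ (true :: (List.replicate m' true ++ pvFlat rest')) := by
            simp [pvFlat, List.replicate_succ]
          rw [hflat, pvBMarkB_falseBlock n _ mR _ (by cases p <;> simp)]
          have hmm : ∀ Z : List Bool, List.replicate m' true ++ true :: Z
              = List.replicate (m' + 1) true ++ Z := by
            intro Z
            simp [List.replicate_succ', List.append_assoc]
          by_cases hcond : p = true ∧ n ≤ 2
          · obtain ⟨rfl, hn2⟩ := hcond
            have hg1 : min ((if (true : Bool) then 0 else 3) + n) 3 = n := by simp; omega
            rw [hg1]
            have hn12 : n = 1 ∨ n = 2 := by omega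
            rw [show pvBMarkB (true :: (List.replicate m' true ++ pvFlat rest'))
                  (List.replicate n false ++ mR) n
                = pvBMarkB (List.replicate m' true ++ pvFlat rest')
                    (true :: (if n = 1 ∨ n = 2 then
                      List.replicate n true ++ (List.replicate n false ++ mR).drop n
                      else List.replicate n false ++ mR)) 0 from rfl]
            rw [if_pos hn12]
            rw [show (List.replicate n false ++ mR).drop n = mR from
              List.drop_left' (List.length_replicate)]
            rw [pvBMarkB_trueBlock m' (pvFlat rest') _, hmm]
            have hih := ih rest' hfuel hrest' true (List.replicate (m' + 1) true ++ (List.replicate n true ++ mR))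
            rw [show (if (true : Bool) then 0 else 3) = 0 from rfl] at hih
            rw [hih]
            rw [show pvFlipFlat true (((false : Bool), n) :: (true, m' + 1) :: rest')
                = List.replicate n (pvFlipD false n true true)
                  ++ (List.replicate (m' + 1) (pvFlipD true (m' + 1) (pvFlipD false n true true) true)
                    ++ pvFlipFlat (pvFlipD true (m' + 1) (pvFlipD false n true true) true) rest') from rfl]
            rw [show pvFlipD false n true true = true from by simp [pvFlipD, hn2]]
            rw [show pvFlipD true (m' + 1) true true = true from by simp [pvFlipD]]
            simp [List.reverse_append, List.append_assoc, List.replicate_append_replicate]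
            rw [← List.append_assoc, List.replicate_append_replicate]
          · have h3 : p = false ∨ ¬ n ≤ 2 := by
              cases p
              · exact Or.inl rfl
              · exact Or.inr (fun hle => hcond ⟨rfl, hle⟩)
            have hg1 : min ((if p then 0 else 3) + n) 3 = 3 := by
              rcases h3 with rfl | h3
              · simp
              · cases p <;> simp <;> omega
            rw [hg1]
            rw [show pvBMarkB (true :: (List.replicate m' true ++ pvFlat rest'))
                  (List.replicate n false ++ mR) 3
                = pvBMarkB (List.replicate m' true ++ pvFlat rest')
                    (true :: (List.replicate n false ++ mR)) 0 from by simp [pvBMarkB]]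
            rw [pvBMarkB_trueBlock m' (pvFlat rest') _, hmm]
            have hih := ih rest' hfuel hrest' true (List.replicate (m' + 1) true ++ (List.replicate n false ++ mR))
            rw [show (if (true : Bool) then 0 else 3) = 0 from rfl] at hih
            rw [hih]
            have hD : pvFlipD false n p true = false := by
              rcases h3 with rfl | h3
              · simp [pvFlipD]
              · simp [pvFlipD, h3]
            rw [show pvFlipFlat p (((false : Bool), n) :: (true, m' + 1) :: rest')
                = List.replicate n (pvFlipD false n p true)
                  ++ (List.replicate (m' + 1) (pvFlipD true (m' + 1) (pvFlipD false n p true) true)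
                    ++ pvFlipFlat (pvFlipD true (m' + 1) (pvFlipD false n p true) true) rest') from rfl]
            rw [hD]
            rw [show pvFlipD true (m' + 1) false true = true from by simp [pvFlipD]]
            simp [List.reverse_append, List.append_assoc, List.replicate_append_replicate]
      · -- a deletion run
        have hrest : pvAlt rest := pvAlt_tail halt
        obtain ⟨m, rfl⟩ : ∃ m, n = m + 1 := ⟨n - 1, by omega⟩
        have hflat : pvFlat (((true : Bool), m + 1) :: rest)
            = true :: (List.replicate m true ++ pvFlat rest) := by
          simp [pvFlat, List.replicate_succ]
        rw [hflat]
        rw [show pvBMarkB (true :: (List.replicate m true ++ pvFlat rest)) mR (if p then 0 else 3)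
            = pvBMarkB (List.replicate m true ++ pvFlat rest) (true :: mR) 0 from by
          cases p <;> simp [pvBMarkB]]
        rw [pvBMarkB_trueBlock m (pvFlat rest) (true :: mR)]
        rw [show List.replicate m true ++ true :: mR = List.replicate (m + 1) true ++ mR from by
          simp [List.replicate_succ', List.append_assoc]]
        have hih := ih rest (by simp at h; omega) hrest true (List.replicate (m + 1) true ++ mR)
        rw [show (if (true : Bool) then 0 else 3) = 0 from rfl] at hih
        rw [hih]
        rw [show pvFlipFlat p (((true : Bool), m + 1) :: rest)
            = List.replicate (m + 1) (pvFlipD true (m + 1) p (!rest.isEmpty))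
              ++ pvFlipFlat (pvFlipD true (m + 1) p (!rest.isEmpty)) rest from rfl]
        rw [show pvFlipD true (m + 1) p (!rest.isEmpty) = true from by simp [pvFlipD]]
        simp [List.reverse_append, List.append_assoc, List.replicate_append_replicate]

theorem pvScan_emit : ∀ (N : Nat) (rs : List (Bool × Nat)), rs.length ≤ N → pvAlt rs →
    ∀ (pos : Nat) (acc : List (List Int)),
    pvBScan (pvFlat rs) pos none acc = pvEmit rs pos acc := by
  intro N
  induction N with
  | zero =>
    intro rs h _ pos acc
    have hnil : rs = [] := List.eq_nil_of_length_eq_zero (Nat.le_zero.mp h)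
    subst hnil
    simp [pvFlat, pvBScan, pvEmit]
  | succ N ih =>
    intro rs h halt pos acc
    rcases rs with _ | ⟨⟨d, n⟩, rest⟩
    · simp [pvFlat, pvBScan, pvEmit]
    · have hn : 1 ≤ n := halt.2 (d, n) (by simp)
      cases d
      · -- letter run: no range, position advances
        have hflat : pvFlat (((false : Bool), n) :: rest) = List.replicate n false ++ pvFlat rest := by
          simp [pvFlat]
        rw [hflat, pvBScan_falseBlock, ih rest (by simp at h; omega) (pvAlt_tail halt) (pos + n) acc,
            pvEmit_false]
      · -- deletion run
        have hflat : pvFlat (((true : Bool), n) :: rest) = List.replicate n true ++ pvFlat rest := by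
          simp [pvFlat]
        rw [hflat, pvBScan_trueStart n (pvFlat rest) pos acc hn]
        cases rest with
        | nil => simp [pvFlat, pvBScan, pvEmit]
        | cons r2 rest' =>
          obtain ⟨d2, m⟩ := r2
          have hne := (List.isChain_cons_cons.mp halt.1).1
          have hd2 : d2 = false := by
            cases d2
            · rfl
            · exact absurd rfl hne
          subst hd2
          have hm1 : 1 ≤ m := halt.2 (false, m) (by simp)
          obtain ⟨q, rfl⟩ : ∃ q, m = q + 1 := ⟨m - 1, by omega⟩
          have hflat2 : pvFlat (((false : Bool), q + 1) :: rest')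
              = false :: (List.replicate q false ++ pvFlat rest') := by
            simp [pvFlat, List.replicate_succ]
          rw [hflat2]
          rw [show pvBScan (false :: (List.replicate q false ++ pvFlat rest')) (pos + n) (some pos) acc
              = pvBScan (List.replicate q false ++ pvFlat rest') (pos + n + 1) none
                  (if 0 < pos then acc ++ [[(pos : Int), ((pos + n : Nat) : Int)]] else acc) from by
            simp [pvBScan]]
          rw [pvBScan_falseBlock]
          have hrest' : pvAlt rest' := pvAlt_tail (pvAlt_tail halt)
          rw [ih rest' (by simp at h; omega) hrest' (pos + n + 1 + q) _]
          rw [show pvEmit (((true : Bool), n) :: ((false : Bool), q + 1) :: rest') pos acc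
              = pvEmit (((false : Bool), q + 1) :: rest') (pos + n)
                  (if 0 < pos then acc ++ [[(pos : Int), ((pos + n : Nat) : Int)]] else acc) from by
            simp [pvEmit]]
          rw [pvEmit_false]
          rw [show pos + n + 1 + q = pos + n + (q + 1) from by omega]

-- ===== VERDICT (by name: the statement is the Claim_ definition above) =====
theorem identifyDeletedRegions_spec : Claim_equal_identifyDeletedRegions := by
  unfold Claim_equal_identifyDeletedRegions
  intro alignedseq _hdom
  unfold Spec_identifyDeletedRegions
  simp only [identifyDeletedRegions, identifyDeletedRegions_alt]
  -- A's side: deletion mask = pvRender (pvBMark …), ranges = pvBScan over the marks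
  have hbuild := pvBuild_loop alignedseq.toList [] [] (by simp)
  simp only [List.nil_append, List.length_nil, Nat.zero_add, Nat.cast_zero] at hbuild
  rw [show pvRender [] = [] from rfl] at hbuild
  rw [show pvGapFun [] = 3 from rfl] at hbuild
  rw [hbuild]
  rw [show (0 : Int) = ((0 : Nat) : Int) from rfl]
  rw [pvScan_loop ((pvRender (pvBMark alignedseq.toList [] 3)).length + 1)
      (pvRender (pvBMark alignedseq.toList [] 3)) 0 []
      (pvRender_chars _) (by omega) (by omega)]
  rw [List.drop_zero, pvRender_map]
  -- switch both sides to the Bool sequence bs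
  set bs := alignedseq.toList.map pvDel with hbs
  rw [pvBMark_eq_B, pvRuns_eq, ← hbs]
  -- B's side: runs = pvRleW bs, flatten of the merge = flip-flat, emit = scan
  rw [pvRleAux_eq_W bs.length bs [] le_rfl (by cases bs <;> trivial)]
  rw [List.reverse_nil, List.nil_append]
  have halt : pvAlt (pvRleW bs) := pvRleW_alt bs.length bs le_rfl
  have hpos : ∀ x ∈ pvRleW bs, 1 ≤ x.2 := halt.2
  have hmalt : pvAlt (pvMerge (pvRleW bs) []) :=
    pvMerge_alt (pvRleW bs) [] hpos ⟨List.isChain_nil, by simp⟩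
  rw [← pvScan_emit (pvMerge (pvRleW bs) []).length _ le_rfl hmalt 0 []]
  rw [pvMerge_flat (pvRleW bs) []]
  rw [show pvFlat ([] : List (Bool × Nat)).reverse = [] from rfl, List.nil_append,
      show pvHeadDel [] = false from rfl]
  have hflip := pvBMarkB_flip (pvRleW bs).length (pvRleW bs) le_rfl halt false []
  rw [show (if false then 0 else 3) = 3 from rfl, List.append_nil,
      pvFlat_rleW bs.length bs le_rfl] at hflip
  rw [hflip, List.reverse_reverse]
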